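-- pv_equiv track=rewrite | github.com/ajs/tools | puzzles/perlweeklychallenge/isomorphic.py | numify
-- ===== SOURCE A (Python) =====
-- def numify(s):
--     """
--     Return an iterator with a single number for each characer in the
--     input string. For each unique character in the input, the output
--     will have a corresponding unique number, starting at 0.
--     """
--
--     mapping = {}
--     n = 0
--
--     for c in s:
--         if c not in mapping:
--             mapping[c] = n
--             n += 1
--         yield mapping[c]
-- ===== SOURCE B (Python) =====
-- def numify(s):
--     """
--     Return an iterator with a single number for each characer in the
--     input string. For each unique character in the input, the output
--     will have a corresponding unique number, starting at 0.
--     """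
--     # No mapping/counter state: sort the unique characters by the position
--     # of their first occurrence (s.index is injective on set(s), so the
--     # order is well defined) and emit each character's rank in that list.
--     firsts = sorted(set(s), key=s.index)
--     for c in s:
--         yield firsts.index(c)
-- ===== Notes on version B (the rewrite author's own statement) =====
-- stated objective: alternative
-- what changed: Replaces A's incrementally-filled dict and counter by a sort: the unique characters are sorted by first-occurrence position (sorted(set(s), key=s.index)) and each character's ordinal is its rank (list.index) in that sorted list.
import Mathlib
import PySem

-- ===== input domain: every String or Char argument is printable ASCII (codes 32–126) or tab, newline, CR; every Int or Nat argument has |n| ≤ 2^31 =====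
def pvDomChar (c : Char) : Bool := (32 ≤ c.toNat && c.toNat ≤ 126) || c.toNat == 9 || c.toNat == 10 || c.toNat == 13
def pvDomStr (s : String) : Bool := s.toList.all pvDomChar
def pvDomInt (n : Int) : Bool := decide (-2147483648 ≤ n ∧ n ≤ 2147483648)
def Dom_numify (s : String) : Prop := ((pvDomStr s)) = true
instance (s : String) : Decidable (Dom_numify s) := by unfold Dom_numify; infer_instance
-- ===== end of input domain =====

-- B replaces A's incrementally-filled dict and counter by a sort: the unique characters are
-- sorted by first-occurrence position and each character's ordinal is its rank in that list.


-- ===== PORT A =====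
-- one pass: `if c not in mapping: mapping[c] = n; n += 1` then `yield mapping[c]`
-- (`mapping[c]` is ported as getD _ 0: the key is always present at that point, so KeyError never occurs)
def numify (s : String) : List Int :=
  (s.toList.foldl
    (fun (st : PySem.Dict Char Int × Int × List Int) c =>
      let m := st.1
      let n := st.2.1
      let out := st.2.2
      if m.contains c then
        (m, n, out ++ [m.getD c 0])
      else
        let m' := m.insert c n
        (m', n + 1, out ++ [m'.getD c 0]))
    (PySem.Dict.empty, 0, [])).2.2

-- ===== PORT B =====
-- firsts = sorted(set(s), key=s.index); then: for c in s: yield firsts.index(c)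
-- (the key s.index is injective on set(s), so the sorted order is hash-order independent;
-- both `.index` calls are ported as (index? …).getD 0: the element is always present,
-- so ValueError never occurs)
def numify_alt (s : String) : List Int :=
  let firsts : List Char :=
    PySem.List.sorted (PySem.Set.ofList s.toList)
      (fun c => ((PySem.List.index? s.toList c).getD 0 : Int)) false
  s.toList.map (fun c => ((PySem.List.index? firsts c).getD 0 : Int))

-- ===== PRECONDITION & SPEC =====
def Spec_numify (s : String) (out : List Int) : Prop := out = numify_alt s
instance (s : String) (out : List Int) : Decidable (Spec_numify s out) := by unfold Spec_numify; infer_instance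

-- ===== CLAIM (what is proved, stated in full; the proofs are below) =====
def Claim_equal_numify : Prop := ∀ (s : String), Dom_numify s → Spec_numify s (numify s)

-- ===== LEMMAS AND PROOFS =====

-- first-appearance ordinal of c in l
def pvIdx (l : List Char) (c : Char) : Int := ((PySem.List.dedup l).idxOf c : Int)

theorem pvDedup_append (l : List Char) (c : Char) :
    PySem.List.dedup (l ++ [c]) =
      if c ∈ l then PySem.List.dedup l else PySem.List.dedup l ++ [c] := by
  have h : PySem.List.dedup (l ++ [c]) = PySem.Set.add (PySem.List.dedup l) c := by
    simp [PySem.List.dedup, PySem.Set.ofList, List.foldl_append]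
  rw [h]
  by_cases hc : c ∈ l
  · simp [PySem.Set.add, hc]
  · have : c ∉ PySem.List.dedup l := by
      simpa [PySem.List.dedup] using fun h' => hc ((PySem.Set.mem_ofList l c).mp h')
    simp [PySem.Set.add, hc]

theorem pvIdx_append_of_mem {l : List Char} {c : Char} (x : Char) (hc : c ∈ l) :
    pvIdx (l ++ [x]) c = pvIdx l c := by
  unfold pvIdx
  rw [pvDedup_append]
  have hmem : c ∈ PySem.List.dedup l := by
    simpa [PySem.List.dedup] using (PySem.Set.mem_ofList l c).mpr hc
  by_cases hx : x ∈ l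
  · simp [hx]
  · rw [if_neg hx]
    exact congrArg _ (List.idxOf_append_of_mem hmem)

theorem pvIdx_append_self {l : List Char} {c : Char} (hc : c ∉ l) :
    pvIdx (l ++ [c]) c = ((PySem.List.dedup l).length : Int) := by
  unfold pvIdx
  rw [pvDedup_append]
  have hmem : c ∉ PySem.List.dedup l := by
    simpa [PySem.List.dedup] using fun h' => hc ((PySem.Set.mem_ofList l c).mp h')
  rw [if_neg hc, List.idxOf_append, if_neg hmem]
  simp

-- the loop body of A, named so the invariant can talk about it
def pvStepA (st : PySem.Dict Char Int × Int × List Int) (c : Char) :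
    PySem.Dict Char Int × Int × List Int :=
  let m := st.1
  let n := st.2.1
  let out := st.2.2
  if m.contains c then
    (m, n, out ++ [m.getD c 0])
  else
    let m' := m.insert c n
    (m', n + 1, out ++ [m'.getD c 0])

theorem pvNumify_eq_foldl (s : String) :
    numify s = (s.toList.foldl pvStepA (PySem.Dict.empty, 0, [])).2.2 := rfl

-- full invariant of A's loop after consuming l
theorem pvA_invariant (l : List Char) :
    (∀ c, (l.foldl pvStepA (PySem.Dict.empty, 0, [])).1.contains c = decide (c ∈ l)) ∧
    (∀ c, c ∈ l → (l.foldl pvStepA (PySem.Dict.empty, 0, [])).1.getD c 0 = pvIdx l c) ∧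
    (l.foldl pvStepA (PySem.Dict.empty, 0, [])).2.1 = ((PySem.List.dedup l).length : Int) ∧
    (l.foldl pvStepA (PySem.Dict.empty, 0, [])).2.2 = l.map (pvIdx l) := by
  induction l using List.reverseRecOn with
  | nil => simp [PySem.Dict.contains_empty]
  | append_singleton l c ih =>
    obtain ⟨hcont, hget, hn, hout⟩ := ih
    rw [List.foldl_append]
    set st := l.foldl pvStepA (PySem.Dict.empty, 0, []) with hst
    simp only [List.foldl_cons, List.foldl_nil]
    by_cases hc : c ∈ l
    · have hb : st.1.contains c = true := by rw [hcont]; simp [hc]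
      have hstep : pvStepA st c = (st.1, st.2.1, st.2.2 ++ [st.1.getD c 0]) := by
        simp [pvStepA, hb]
      rw [hstep]
      refine ⟨?_, ?_, ?_, ?_⟩
      · intro x; rw [hcont]
        by_cases hx : x = c <;> simp [hx, hc]
      · intro x hx
        have hx' : x ∈ l := by
          rcases List.mem_append.mp hx with h | h
          · exact h
          · simp at h; simpa [h] using hc
        rw [hget x hx', pvIdx_append_of_mem c hx']
      · rw [hn, pvDedup_append]; simp [hc]
      · rw [hout, hget c hc, List.map_append]
        show List.map (pvIdx l) l ++ [pvIdx l c] =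
          List.map (pvIdx (l ++ [c])) l ++ List.map (pvIdx (l ++ [c])) [c]
        congr 1
        · exact (List.map_congr_left (fun x hx => pvIdx_append_of_mem c hx)).symm
        · simp [pvIdx_append_of_mem c hc]
    · have hb : st.1.contains c = false := by rw [hcont]; simp [hc]
      have hstep : pvStepA st c =
          (st.1.insert c st.2.1, st.2.1 + 1, st.2.2 ++ [(st.1.insert c st.2.1).getD c 0]) := by
        simp [pvStepA, hb]
      rw [hstep]
      refine ⟨?_, ?_, ?_, ?_⟩
      · intro x
        rw [PySem.Dict.contains_insert, hcont]
        by_cases hx : x = c <;> simp [hx]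
      · intro x hx
        by_cases hx' : x = c
        · subst hx'
          rw [PySem.Dict.getD_insert_self, hn, pvIdx_append_self hc]
        · have hxl : x ∈ l := by
            rcases List.mem_append.mp hx with h | h
            · exact h
            · simp at h; exact absurd h hx'
          rw [PySem.Dict.getD_insert, if_neg hx', hget x hxl,
            pvIdx_append_of_mem c hxl]
      · rw [hn, pvDedup_append]; simp [hc]
      · rw [hout, List.map_append, PySem.Dict.getD_insert_self, hn]
        show List.map (pvIdx l) l ++ [((PySem.List.dedup l).length : Int)] =
          List.map (pvIdx (l ++ [c])) l ++ List.map (pvIdx (l ++ [c])) [c]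
        congr 1
        · exact (List.map_congr_left (fun x hx => pvIdx_append_of_mem c hx)).symm
        · simp [pvIdx_append_self hc]

theorem pvIdxOf?_of_mem (l : List Char) (c : Char) (hc : c ∈ l) :
    List.idxOf? c l = some (l.idxOf c) := by
  induction l with
  | nil => cases hc
  | cons x t ih =>
    by_cases h : x = c
    · simp [List.idxOf?_cons, h]
    · have hct : c ∈ t := by cases hc with | head => exact absurd rfl h | tail _ m => exact m
      simp [List.idxOf?_cons, h, ih hct]

theorem pvMem_dedup {l : List Char} {c : Char} (h : c ∈ PySem.List.dedup l) : c ∈ l := by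
  rw [PySem.List.dedup_eq_ofList] at h
  exact (PySem.Set.mem_ofList l c).mp h

-- the dedup list is strictly increasing in first-occurrence position
theorem pvDedup_pairwise (l : List Char) :
    (PySem.List.dedup l).Pairwise (fun a b => l.idxOf a < l.idxOf b) := by
  induction l using List.reverseRecOn with
  | nil => simp [PySem.List.dedup, PySem.Set.ofList]
  | append_singleton l x ih =>
    rw [pvDedup_append]
    by_cases hx : x ∈ l
    · rw [if_pos hx]
      refine ih.imp_of_mem ?_
      intro a b ha hb hab
      rw [List.idxOf_append_of_mem (pvMem_dedup ha),
        List.idxOf_append_of_mem (pvMem_dedup hb)]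
      exact hab
    · rw [if_neg hx]
      rw [List.pairwise_append]
      refine ⟨ih.imp_of_mem ?_, by simp, ?_⟩
      · intro a b ha hb hab
        rw [List.idxOf_append_of_mem (pvMem_dedup ha),
          List.idxOf_append_of_mem (pvMem_dedup hb)]
        exact hab
      · intro a ha b hb
        have hb' : b = x := by simpa using hb
        subst hb'
        have hal : a ∈ l := pvMem_dedup ha
        rw [List.idxOf_append_of_mem hal, List.idxOf_append, if_neg hx]
        have := List.idxOf_lt_length_of_mem hal
        simp
        omega

-- B's key: for a character of s it is the first-occurrence position
theorem pvKey_of_mem (l : List Char) (c : Char) (hc : c ∈ l) :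
    ((PySem.List.index? l c).getD 0 : Int) = (l.idxOf c : Int) := by
  rw [PySem.List.index?_eq_idxOf?, pvIdxOf?_of_mem l c hc]
  rfl

-- the sort in B just names dedup's order
theorem pvFirsts_eq (l : List Char) :
    PySem.List.sorted (PySem.Set.ofList l)
      (fun c => ((PySem.List.index? l c).getD 0 : Int)) false = PySem.List.dedup l := by
  apply PySem.List.sorted_eq_of_perm_of_pairwise_lt
  · rw [PySem.List.dedup_eq_ofList]
  · refine (pvDedup_pairwise l).imp_of_mem ?_
    intro a b ha hb hab
    rw [pvKey_of_mem l a (pvMem_dedup ha), pvKey_of_mem l b (pvMem_dedup hb)]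
    exact_mod_cast hab

theorem pvB_eq_map (s : String) : numify_alt s = s.toList.map (pvIdx s.toList) := by
  unfold numify_alt
  rw [pvFirsts_eq]
  apply List.map_congr_left
  intro c hc
  have hmem : c ∈ PySem.List.dedup s.toList := by
    rw [PySem.List.dedup_eq_ofList]
    exact (PySem.Set.mem_ofList s.toList c).mpr hc
  rw [pvKey_of_mem _ c hmem]
  rfl

-- ===== VERDICT (by name: the statement is the Claim_ definition above) =====
theorem numify_spec : Claim_equal_numify := by
  intro s _
  unfold Spec_numify
  rw [pvNumify_eq_foldl, (pvA_invariant s.toList).2.2.2, pvB_eq_map]
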